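-- pv_equiv track=rewrite | github.com/MrBrantCode/unitest_baseline | mut_generate/mist_train_cf/cf_62396/solution.py | find_hex_group
-- ===== SOURCE A (Python) =====
-- def find_hex_group(hex_string, target_product):
--     """
--     Find a specific group of hexadecimal digits in a sequence whose product equals a predefined number.
--
--     Args:
--         hex_string (str): A string of hexadecimal digits.
--         target_product (int): The target product.
--
--     Returns:
--         str: The first sequence of hexadecimal digits that, when multiplied, equals the target product.
--     """
--
--     def hex_to_int(hex_str):
--         # Convert a hexadecimal string to an integer
--         return int(hex_str, 16)
--
--     def is_valid_product(hex_str):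
--         # Check if the product of hexadecimal digits in a string equals the target product
--         product = 1
--         for digit in hex_str:
--             product *= hex_to_int(digit)
--         return product == target_product
--
--     window_size = 1
--     while window_size <= len(hex_string):
--         for i in range(len(hex_string) - window_size + 1):
--             # Get the current window of hexadecimal digits
--             window = hex_string[i:i + window_size]
--             # Check if the product of the current window equals the target product
--             if is_valid_product(window):
--                 return window
--         window_size += 1
--     return None
-- ===== SOURCE B (Python) =====
-- def find_hex_group(hex_string, target_product):
--     n = len(hex_string)
--     best = None  # (length, start), shortest then leftmost
--     for i in range(n):
--         product = 1
--         for j in range(i, n):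
--             product *= int(hex_string[j], 16)
--             if product == target_product:
--                 length = j - i + 1
--                 if best is None or length < best[0]:
--                     best = (length, i)
--                 break
--             # no later window from this start can reach the target:
--             # a zero product stays zero, and digits are >= 0, so once the
--             # product exceeds |target| it can only grow or drop to 0
--             if product == 0 or (target_product != 0 and abs(target_product) < product):
--                 break
--     if best is None:
--         return None
--     return hex_string[best[1]:best[1] + best[0]]
-- ===== Notes on version B (the rewrite author's own statement) =====
-- stated objective: faster
-- what changed: Replaced the window-size-major triple loop (recomputing each window's product from scratch) by a per-start incremental running product that records the first (shortest) hit per start and keeps the global shortest-then-leftmost candidate.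
-- outside the precondition, e.g. on find_hex_group('5g', 5): A returns '5', B raises ValueError
import Mathlib
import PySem

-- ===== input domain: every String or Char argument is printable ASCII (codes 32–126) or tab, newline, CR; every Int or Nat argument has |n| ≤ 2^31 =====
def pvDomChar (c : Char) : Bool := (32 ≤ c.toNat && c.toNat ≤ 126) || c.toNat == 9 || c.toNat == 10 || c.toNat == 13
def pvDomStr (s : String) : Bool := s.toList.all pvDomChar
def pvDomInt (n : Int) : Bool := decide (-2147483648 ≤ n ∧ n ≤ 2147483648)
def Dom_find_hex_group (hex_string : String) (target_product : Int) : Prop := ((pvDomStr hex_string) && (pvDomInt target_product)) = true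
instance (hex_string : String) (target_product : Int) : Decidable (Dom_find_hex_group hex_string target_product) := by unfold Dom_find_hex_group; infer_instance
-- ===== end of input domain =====

-- B replaces A's window-size-major triple loop by a per-start incremental running product
-- keeping the shortest-then-leftmost hit (objective: faster; measured asymptotic change).

-- ===== PORT A =====
-- int(c, 16) for the single character c; under Pre_ every scanned char is a hex digit,
-- so the ValueError branch (none) never fires and the default 0 is never used.
def hexVal (c : Char) : Int := (PySem.Int.ofCharsBase? [c] 16).getD 0

-- is_valid_product's loop: product = 1; for digit in w: product *= int(digit, 16)
def prodHex (w : List Char) : Int := w.foldl (fun p c => p * hexVal c) 1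

-- the while loop: window_size = ws; hex_string[i:i+ws] = (cs.drop i).take ws since
-- 0 ≤ i and i + ws ≤ cs.length for every i in range(len - ws + 1)
def loopA (cs : List Char) (t : Int) (ws : Nat) : Option (List Char) :=
  if ws ≤ cs.length then
    match (List.range (cs.length - ws + 1)).find?
        (fun i => prodHex ((cs.drop i).take ws) == t) with
    | some i => some ((cs.drop i).take ws)
    | none => loopA cs t (ws + 1)
  else none
termination_by cs.length + 1 - ws

def find_hex_group (hex_string : String) (target_product : Int) : Option String :=
  (loopA hex_string.toList target_product 1).map (fun w => String.ofList w)

-- ===== PORT B =====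
-- "if best is None or length < best[0]: best = (length, i)"
def bBest (best : Option (Nat × Nat)) (c : Nat × Nat) : Option (Nat × Nat) :=
  match best with
  | none => some c
  | some b => if c.1 < b.1 then some c else some b

-- inner loop of B: for j in range(i, n): product *= int(hex_string[j], 16);
-- if product == target: return length j - i + 1 (break); j+1-i = j-i+1 in Nat since i ≤ j
-- "if product == 0 or (target_product != 0 and abs(target_product) < product): break"
def innerB (cs : List Char) (t : Int) (i : Nat) (j : Nat) (p : Int) : Option Nat :=
  if h : j < cs.length then
    let p' := p * hexVal cs[j]
    if p' == t then some (j + 1 - i)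
    else if p' == 0 || (!(t == 0) && decide (|t| < p')) then none
    else innerB cs t i (j + 1) p'
  else none
termination_by cs.length - j

def find_hex_group_alt (hex_string : String) (target_product : Int) : Option String :=
  let cs := hex_string.toList
  let best := (List.range cs.length).foldl
    (fun best i =>
      match innerB cs target_product i i 1 with
      | some L => bBest best (L, i)
      | none => best) none
  match best with
  | none => none
  | some b => some (String.ofList ((cs.drop b.2).take b.1))

-- ===== PRECONDITION & SPEC =====
-- Pre_ excludes strings containing a non-hex-digit character: there int(c, 16) raises
-- ValueError — B always raises on such strings (it scans every char), and A either raises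
-- or (if an earlier window already matched) returns early before reaching the bad char.
def Pre_find_hex_group (hex_string : String) (target_product : Int) : Prop :=
  hex_string.toList.all (fun c =>
    (48 ≤ c.toNat && c.toNat ≤ 57) || (97 ≤ c.toNat && c.toNat ≤ 102) ||
    (65 ≤ c.toNat && c.toNat ≤ 70)) = true
instance (hex_string : String) (target_product : Int) : Decidable (Pre_find_hex_group hex_string target_product) := by unfold Pre_find_hex_group; infer_instance

def pvWitness_find_hex_group : String × Int := ("2a", 20)

def Spec_find_hex_group (hex_string : String) (target_product : Int) (out : Option String) : Prop := out = find_hex_group_alt hex_string target_product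
instance (hex_string : String) (target_product : Int) (out : Option String) : Decidable (Spec_find_hex_group hex_string target_product out) := by unfold Spec_find_hex_group; infer_instance

-- ===== CLAIM (what is proved, stated in full; the proofs are below) =====
def Claim_equal_find_hex_group : Prop := ∀ (hex_string : String) (target_product : Int), Dom_find_hex_group hex_string target_product → Pre_find_hex_group hex_string target_product → Spec_find_hex_group hex_string target_product (find_hex_group hex_string target_product)

-- ===== LEMMAS AND PROOFS =====

def okP (cs : List Char) (t : Int) (L i : Nat) : Bool := prodHex ((cs.drop i).take L) == t

theorem prod_take_succ (cs : List Char) (i j : Nat) (hij : i ≤ j) (h : j < cs.length) :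
    prodHex ((cs.drop i).take (j - i + 1)) = prodHex ((cs.drop i).take (j - i)) * hexVal (cs[j]'h) := by
  have hm : j - i < (cs.drop i).length := by simp; omega
  rw [← List.take_append_getElem hm]
  simp [prodHex, List.getElem_drop, show i + (j - i) = j by omega]

theorem prodHex_eq (w : List Char) : prodHex w = (w.map hexVal).prod := by
  simp [prodHex, List.prod_eq_foldl, List.foldl_map]

theorem aux_digit (n : Nat) (ha : 48 ≤ n) (hb : n ≤ 57) : 0 ≤ hexVal (Char.ofNat n) := by
  interval_cases n <;> decide

theorem aux_lower (n : Nat) (ha : 97 ≤ n) (hb : n ≤ 102) : 0 ≤ hexVal (Char.ofNat n) := by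
  interval_cases n <;> decide

theorem aux_upper (n : Nat) (ha : 65 ≤ n) (hb : n ≤ 70) : 0 ≤ hexVal (Char.ofNat n) := by
  interval_cases n <;> decide

theorem hexVal_nonneg_of_hex (c : Char)
    (hc : ((48 ≤ c.toNat && c.toNat ≤ 57) || (97 ≤ c.toNat && c.toNat ≤ 102) ||
      (65 ≤ c.toNat && c.toNat ≤ 70)) = true) : 0 ≤ hexVal c := by
  have h1 : Char.ofNat c.toNat = c := Char.ofNat_toNat c
  simp at hc
  rw [← h1]
  rcases hc with (h | h) | h
  · exact aux_digit c.toNat h.1 h.2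
  · exact aux_lower c.toNat h.1 h.2
  · exact aux_upper c.toNat h.1 h.2

-- once the running product is 0 (with t ≠ 0) or exceeds |t|, no extension can hit t
theorem no_future_hit (cs : List Char) (t : Int) (i j : Nat)
    (hnn : ∀ c ∈ cs, 0 ≤ hexVal c) (hij : i ≤ j) (hjl : j < cs.length)
    (hbrk : prodHex ((cs.drop i).take (j + 1 - i)) = 0 ∧ t ≠ 0 ∨
            t ≠ 0 ∧ |t| < prodHex ((cs.drop i).take (j + 1 - i))) :
    ∀ k, j + 1 ≤ k → okP cs t (k + 1 - i) i = false := by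
  intro k hk
  have hsplit : (cs.drop i).take (k + 1 - i) =
      (cs.drop i).take (j + 1 - i) ++ ((cs.drop i).drop (j + 1 - i)).take (k + 1 - i - (j + 1 - i)) := by
    rw [← List.take_add, show j + 1 - i + (k + 1 - i - (j + 1 - i)) = k + 1 - i by omega]
  have he : 0 ≤ prodHex (((cs.drop i).drop (j + 1 - i)).take (k + 1 - i - (j + 1 - i))) := by
    rw [prodHex_eq]
    apply List.prod_nonneg
    intro x hx
    rcases List.mem_map.mp hx with ⟨c, hc, rfl⟩
    exact hnn c (List.mem_of_mem_drop (List.mem_of_mem_drop (List.mem_of_mem_take hc)))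
  have hprod : prodHex ((cs.drop i).take (k + 1 - i)) =
      prodHex ((cs.drop i).take (j + 1 - i)) *
        prodHex (((cs.drop i).drop (j + 1 - i)).take (k + 1 - i - (j + 1 - i))) := by
    rw [hsplit, prodHex_eq, List.map_append, List.prod_append, ← prodHex_eq, ← prodHex_eq]
  set e := prodHex (((cs.drop i).drop (j + 1 - i)).take (k + 1 - i - (j + 1 - i))) with he'
  simp only [okP, beq_eq_false_iff_ne, ne_eq]
  rw [hprod]
  rcases hbrk with ⟨hz, ht⟩ | ⟨ht, hgt⟩
  · rw [hz, zero_mul]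
    omega
  · intro hcontra
    rcases lt_or_ge e 1 with he1 | he1
    · have : e = 0 := by omega
      rw [this, mul_zero] at hcontra
      exact ht hcontra.symm
    · have hp0 : 0 ≤ prodHex ((cs.drop i).take (j + 1 - i)) := by
        have := abs_nonneg t; omega
      have := mul_le_mul_of_nonneg_left he1 hp0
      rw [mul_one] at this
      have habs := abs_nonneg t
      have := le_abs_self t
      omega

theorem innerB_eq (cs : List Char) (t : Int) (i : Nat) (hnn : ∀ c ∈ cs, 0 ≤ hexVal c) :
    ∀ fuel j, cs.length - j = fuel → i ≤ j →
    innerB cs t i j (prodHex ((cs.drop i).take (j - i))) =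
      ((List.range' j (cs.length - j)).find? (fun k => okP cs t (k + 1 - i) i)).map
        (fun k => k + 1 - i) := by
  intro fuel
  induction fuel with
  | zero =>
    intro j hj hij
    rw [innerB]
    simp [hj, show ¬ j < cs.length by omega]
  | succ fuel ih =>
    intro j hj hij
    have hjl : j < cs.length := by omega
    rw [innerB]
    simp only [hjl, dif_pos, hj, List.range'_succ, List.find?_cons]
    rw [← prod_take_succ cs i j hij hjl]
    by_cases hok : prodHex ((cs.drop i).take (j - i + 1)) = t
    · have hb : (prodHex ((cs.drop i).take (j - i + 1)) == t) = true := by simp [hok]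
      have hb2 : okP cs t (j + 1 - i) i = true := by
        simp [okP, show j + 1 - i = j - i + 1 by omega, hok]
      rw [hb, hb2]
      simp [show j + 1 - i = j - i + 1 by omega]
    · have hb : (prodHex ((cs.drop i).take (j - i + 1)) == t) = false := by simp [hok]
      have hb2 : okP cs t (j + 1 - i) i = false := by
        simp [okP, show j + 1 - i = j - i + 1 by omega, hok]
      rw [hb, hb2]
      by_cases hbrk : prodHex ((cs.drop i).take (j - i + 1)) = 0 ∨
          (t ≠ 0 ∧ |t| < prodHex ((cs.drop i).take (j - i + 1)))
      · have hcond : (prodHex ((cs.drop i).take (j - i + 1)) == 0 ||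
            (!(t == 0) && decide (|t| < prodHex ((cs.drop i).take (j - i + 1))))) = true := by
          rcases hbrk with h | ⟨h1, h2⟩ <;> simp [*]
        rw [hcond]
        have hnf := no_future_hit cs t i j hnn hij hjl (by
          rw [show j + 1 - i = j - i + 1 by omega]
          rcases hbrk with h | ⟨h1, h2⟩
          · exact Or.inl ⟨h, by intro ht; rw [ht] at hok; exact hok h⟩
          · exact Or.inr ⟨h1, h2⟩)
        have : List.find? (fun k => okP cs t (k + 1 - i) i) (List.range' (j + 1) fuel) = none := by
          rw [List.find?_eq_none]
          intro k hk
          rw [List.mem_range'_1] at hk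
          simp [hnf k (by omega)]
        rw [this]
        simp
      · push_neg at hbrk
        have hcond : (prodHex ((cs.drop i).take (j - i + 1)) == 0 ||
            (!(t == 0) && decide (|t| < prodHex ((cs.drop i).take (j - i + 1))))) = false := by
          rcases hbrk with ⟨h1, h2⟩
          simp only [Bool.or_eq_false_iff, Bool.and_eq_false_iff, beq_eq_false_iff_ne]
          constructor
          · exact h1
          · by_cases ht : t = 0
            · left; simp [ht]
            · right; simpa using h2 ht
        rw [hcond]
        have := ih (j + 1) (by omega) (by omega)
        rw [show j + 1 - i = j - i + 1 by omega] at this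
        simpa [show cs.length - (j + 1) = fuel by omega] using this

def candP (cs : List Char) (t : Int) (L i : Nat) : Prop :=
  1 ≤ L ∧ i + L ≤ cs.length ∧ okP cs t L i = true

theorem find?_first {α : Type} {r : α → α → Prop} {l : List α} {p : α → Bool} {x : α}
    (hs : l.Pairwise r) (hx : l.find? p = some x) :
    ∀ y ∈ l, p y = true → x = y ∨ r x y := by
  induction l with
  | nil => simp at hx
  | cons a l ih =>
    rw [List.find?_cons] at hx
    rcases List.pairwise_cons.mp hs with ⟨ha, hl⟩
    by_cases hpa : p a = true
    · simp [hpa] at hx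
      subst hx
      intro y hy hpy
      rcases List.mem_cons.mp hy with rfl | hy
      · exact Or.inl rfl
      · exact Or.inr (ha y hy)
    · simp [hpa] at hx
      intro y hy hpy
      rcases List.mem_cons.mp hy with rfl | hy
      · simp_all
      · exact ih hl hx y hy hpy

theorem firstLen_cand (cs : List Char) (t : Int) (i L : Nat)
    (hnn : ∀ c ∈ cs, 0 ≤ hexVal c)
    (h : innerB cs t i i 1 = some L) : candP cs t L i := by
  have h0 : innerB cs t i i 1 = innerB cs t i i (prodHex ((cs.drop i).take (i - i))) := by
    simp [prodHex]
  rw [h0, innerB_eq cs t i hnn (cs.length - i) i rfl (le_refl i)] at h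
  rcases Option.map_eq_some_iff.mp h with ⟨k, hk, hL⟩
  have hmem := List.mem_of_find?_eq_some hk
  have hpred := List.find?_some hk
  rw [List.mem_range'_1] at hmem
  refine ⟨by omega, by omega, ?_⟩
  rw [← hL]
  exact hpred

theorem firstLen_min (cs : List Char) (t : Int) (i L : Nat)
    (hnn : ∀ c ∈ cs, 0 ≤ hexVal c) (h : candP cs t L i) :
    ∃ L', L' ≤ L ∧ innerB cs t i i 1 = some L' := by
  obtain ⟨h1, h2, h3⟩ := h
  have h0 : innerB cs t i i 1 = innerB cs t i i (prodHex ((cs.drop i).take (i - i))) := by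
    simp [prodHex]
  rw [h0, innerB_eq cs t i hnn (cs.length - i) i rfl (le_refl i)]
  have hkmem : i + L - 1 ∈ List.range' i (cs.length - i) := by
    rw [List.mem_range'_1]; omega
  have hkp : okP cs t (i + L - 1 + 1 - i) i = true := by
    rw [show i + L - 1 + 1 - i = L by omega]; exact h3
  have hsome : (List.find? (fun k => okP cs t (k + 1 - i) i) (List.range' i (cs.length - i))).isSome := by
    rw [List.find?_isSome]
    exact ⟨i + L - 1, hkmem, hkp⟩
  obtain ⟨x, hx⟩ := Option.isSome_iff_exists.mp hsome
  have hxmem := List.mem_of_find?_eq_some hx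
  rw [List.mem_range'_1] at hxmem
  have hxle : x ≤ i + L - 1 := by
    rcases find?_first (List.pairwise_lt_range' (s := i) (n := cs.length - i) 1) hx (i + L - 1) hkmem hkp with rfl | hlt
    · omega
    · omega
  exact ⟨x + 1 - i, by omega, by rw [hx]; rfl⟩

theorem loopA_none (cs : List Char) (t : Int) :
    ∀ fuel ws, cs.length + 1 - ws = fuel → loopA cs t ws = none →
      ∀ L i, ws ≤ L → ¬ candP cs t L i := by
  intro fuel
  induction fuel with
  | zero =>
    intro ws hf _ L i hwsL hcand
    obtain ⟨h1, h2, _⟩ := hcand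
    omega
  | succ fuel ih =>
    intro ws hf h L i hwsL hcand
    have hws : ws ≤ cs.length := by omega
    rw [loopA, if_pos hws] at h
    cases hfind : (List.range (cs.length - ws + 1)).find?
        (fun i => prodHex ((cs.drop i).take ws) == t) with
    | some i0 => rw [hfind] at h; simp at h
    | none =>
      rw [hfind] at h
      rcases Nat.eq_or_lt_of_le hwsL with rfl | hlt
      · obtain ⟨h1, h2, h3⟩ := hcand
        have : i ∈ List.range (cs.length - ws + 1) := by rw [List.mem_range]; omega
        have := List.find?_eq_none.mp hfind i this
        simp [okP] at h3
        simp [h3] at this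
      · exact ih (ws + 1) (by omega) h L i (by omega) hcand

theorem loopA_some (cs : List Char) (t : Int) :
    ∀ fuel ws w, cs.length + 1 - ws = fuel → 1 ≤ ws → loopA cs t ws = some w →
      ∃ L i, w = (cs.drop i).take L ∧ ws ≤ L ∧ candP cs t L i ∧
        ∀ L' i', ws ≤ L' → candP cs t L' i' → L < L' ∨ (L = L' ∧ i ≤ i') := by
  intro fuel
  induction fuel with
  | zero =>
    intro ws w hf _ h
    rw [loopA, if_neg (by omega)] at h
    simp at h
  | succ fuel ih =>
    intro ws w hf hws1 h
    have hws : ws ≤ cs.length := by omega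
    rw [loopA, if_pos hws] at h
    cases hfind : (List.range (cs.length - ws + 1)).find?
        (fun i => prodHex ((cs.drop i).take ws) == t) with
    | some i0 =>
      rw [hfind] at h
      simp only [Option.some.injEq] at h
      have hmem := List.mem_of_find?_eq_some hfind
      rw [List.mem_range] at hmem
      have hpred := List.find?_some hfind
      refine ⟨ws, i0, h.symm, le_refl ws, ⟨hws1, by omega, hpred⟩, ?_⟩
      intro L' i' hwsL' hcand'
      rcases Nat.eq_or_lt_of_le hwsL' with rfl | hlt
      · obtain ⟨h1, h2, h3⟩ := hcand'
        have hmem' : i' ∈ List.range (cs.length - ws + 1) := by rw [List.mem_range]; omega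
        rcases find?_first (List.pairwise_lt_range) hfind i' hmem' h3 with rfl | hlt2
        · exact Or.inr ⟨rfl, le_refl _⟩
        · exact Or.inr ⟨rfl, by omega⟩
      · exact Or.inl hlt
    | none =>
      rw [hfind] at h
      obtain ⟨L, i, hw, hwsL, hcand, hmin⟩ := ih (ws + 1) w (by omega) (by omega) h
      refine ⟨L, i, hw, by omega, hcand, ?_⟩
      intro L' i' hwsL' hcand'
      rcases Nat.eq_or_lt_of_le hwsL' with rfl | hlt
      · obtain ⟨h1, h2, h3⟩ := hcand'
        have hmem' : i' ∈ List.range (cs.length - ws + 1) := by rw [List.mem_range]; omega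
        have := List.find?_eq_none.mp hfind i' hmem'
        simp [okP] at h3
        simp [h3] at this
      · exact hmin L' i' (by omega) hcand'

theorem bBest_ne_none (best : Option (Nat × Nat)) (c : Nat × Nat) : bBest best c ≠ none := by
  cases best with
  | none => simp [bBest]
  | some b => simp [bBest]; split <;> simp

theorem foldB_spec : ∀ (l : List (Nat × Nat)) (acc : Option (Nat × Nat)),
    l.Pairwise (fun a b => a.2 < b.2) →
    (∀ a, acc = some a → ∀ q ∈ l, a.2 < q.2) →
    match l.foldl bBest acc with
    | none => acc = none ∧ l = []
    | some m =>
        (acc = some m ∨ m ∈ l) ∧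
        (∀ a, acc = some a → m.1 ≤ a.1 ∧ (a.1 = m.1 → m.2 ≤ a.2)) ∧
        (∀ q ∈ l, m.1 ≤ q.1 ∧ (q.1 = m.1 → m.2 ≤ q.2)) := by
  intro l
  induction l with
  | nil =>
    intro acc _ _
    cases acc with
    | none => simp
    | some a =>
      simp only [List.foldl_nil]
      refine ⟨Or.inl trivial, ?_, ?_⟩
      · intro b hb
        cases hb
        exact ⟨le_refl _, fun _ => le_refl _⟩
      · intro q hq
        simp at hq
  | cons q rest ih =>
    intro acc hpw hacc
    rw [List.foldl_cons]
    have hq := (List.pairwise_cons.mp hpw).1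
    have hpw' := (List.pairwise_cons.mp hpw).2
    have hacc' : ∀ a, bBest acc q = some a → ∀ r ∈ rest, a.2 < r.2 := by
      intro a ha r hr
      cases acc with
      | none =>
        simp [bBest] at ha
        subst ha
        exact hq r hr
      | some b =>
        simp only [bBest] at ha
        split at ha <;> simp only [Option.some.injEq] at ha <;> subst ha
        · exact hq r hr
        · exact hacc b rfl r (List.mem_cons_of_mem q hr)
    have H := ih (bBest acc q) hpw' hacc'
    cases hr : rest.foldl bBest (bBest acc q) with
    | none =>
      rw [hr] at H
      exact absurd H.1 (bBest_ne_none acc q)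
    | some m =>
      rw [hr] at H
      obtain ⟨Hmem, Hacc, Hrest⟩ := H
      refine ⟨?_, ?_, ?_⟩
      · rcases Hmem with hbm | hm
        · cases acc with
          | none =>
            simp [bBest] at hbm
            exact Or.inr (by simp [hbm])
          | some b =>
            simp only [bBest] at hbm
            split at hbm <;> simp only [Option.some.injEq] at hbm
            · exact Or.inr (by simp [hbm])
            · exact Or.inl (by rw [hbm])
        · exact Or.inr (List.mem_cons_of_mem q hm)
      · intro a ha
        subst ha
        by_cases hlt : q.1 < a.1
        · have hba : bBest (some a) q = some q := by simp [bBest, hlt]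
          have := Hacc q hba
          exact ⟨by omega, fun h => by omega⟩
        · have hba : bBest (some a) q = some a := by simp [bBest, hlt]
          exact Hacc a hba
      · intro r hr'
        rcases List.mem_cons.mp hr' with rfl | hrest
        · cases acc with
          | none => exact Hacc r (by simp [bBest])
          | some b =>
            by_cases hlt : r.1 < b.1
            · exact Hacc r (by simp [bBest, hlt])
            · have := Hacc b (by simp [bBest, hlt])
              have hbr : b.2 < r.2 := hacc b rfl r (List.mem_cons_self ..)
              exact ⟨by omega, fun h => by omega⟩
        · exact Hrest r hrest

theorem foldl_skip_none (g : Nat → Option Nat) :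
    ∀ (l : List Nat) (acc : Option (Nat × Nat)),
    l.foldl (fun best i => match g i with | some L => bBest best (L, i) | none => best) acc
      = (l.filterMap (fun i => (g i).map (fun L => (L, i)))).foldl bBest acc := by
  intro l
  induction l with
  | nil => intro acc; rfl
  | cons i rest ih =>
    intro acc
    cases hgi : g i <;> simp [hgi, ih]

theorem main (s : String) (t : Int) (hpre : Pre_find_hex_group s t) :
    find_hex_group s t = find_hex_group_alt s t := by
  unfold find_hex_group find_hex_group_alt
  set cs := s.toList with hcs
  have hnn : ∀ c ∈ cs, 0 ≤ hexVal c := by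
    intro c hc
    exact hexVal_nonneg_of_hex c (List.all_eq_true.mp hpre c hc)
  show Option.map (fun w => String.ofList w) (loopA cs t 1) =
    match List.foldl (fun best i =>
        match innerB cs t i i 1 with
        | some L => bBest best (L, i)
        | none => best) none (List.range cs.length) with
    | none => none
    | some b => some (String.ofList ((cs.drop b.2).take b.1))
  rw [foldl_skip_none (fun i => innerB cs t i i 1)]
  set M := (List.range cs.length).filterMap
      (fun i => (innerB cs t i i 1).map (fun L => (L, i))) with hM
  have hMmem : ∀ q : Nat × Nat, q ∈ M ↔ q.2 < cs.length ∧ innerB cs t q.2 q.2 1 = some q.1 := by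
    intro q
    rw [hM, List.mem_filterMap]
    constructor
    · rintro ⟨i, hi, hq⟩
      rw [Option.map_eq_some_iff] at hq
      obtain ⟨L, hL, rfl⟩ := hq
      exact ⟨by simpa using hi, hL⟩
    · rintro ⟨h1, h2⟩
      exact ⟨q.2, by simpa using h1, by rw [h2]; rfl⟩
  have hMpw : M.Pairwise (fun a b => a.2 < b.2) := by
    rw [hM, List.pairwise_filterMap]
    refine List.pairwise_lt_range.imp ?_
    intro a b hab x hx y hy
    simp only [Option.map_eq_some_iff] at hx hy
    obtain ⟨La, _, rfl⟩ := hx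
    obtain ⟨Lb, _, rfl⟩ := hy
    exact hab
  cases hA : loopA cs t 1 with
  | none =>
    have hnc := loopA_none cs t cs.length 1 (by omega) hA
    have hMnil : M = [] := by
      rw [List.eq_nil_iff_forall_not_mem]
      intro q hq
      obtain ⟨h1, h2⟩ := (hMmem q).mp hq
      have hc := firstLen_cand cs t q.2 q.1 hnn h2
      exact hnc q.1 q.2 hc.1 hc
    rw [hMnil]
    rfl
  | some w =>
    obtain ⟨L, i, hw, h1L, hcand, hmin⟩ := loopA_some cs t cs.length 1 w (by omega) (le_refl 1) hA
    have hgi : innerB cs t i i 1 = some L := by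
      obtain ⟨L', hle, hg⟩ := firstLen_min cs t i L hnn hcand
      have hc' := firstLen_cand cs t i L' hnn hg
      have := hmin L' i hc'.1 hc'
      have : L = L' := by omega
      rw [← this] at hg
      exact hg
    have hLiM : (L, i) ∈ M := (hMmem (L, i)).mpr ⟨by obtain ⟨a, b, _⟩ := hcand; omega, hgi⟩
    have HF := foldB_spec M none hMpw (by simp)
    cases hfold : M.foldl bBest none with
    | none =>
      rw [hfold] at HF
      rw [HF.2] at hLiM
      simp at hLiM
    | some m =>
      rw [hfold] at HF
      obtain ⟨Hmem0, _, hforall⟩ := HF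
      have hmM := (hMmem m).mp (by
        rcases Hmem0 with h | h
        · simp at h
        · exact h)
      have hc := firstLen_cand cs t m.2 m.1 hnn hmM.2
      have h1 := hmin m.1 m.2 hc.1 hc
      have h2 := hforall (L, i) hLiM
      have hLm : m.1 = L := by
        rcases h1 with h | h <;> omega
      have him : m.2 = i := by
        have h3 := h2.2 hLm.symm
        rcases h1 with h | h <;> omega
      rw [hw]
      simp [hLm, him]


-- ===== VERDICT (by name: the statement is the Claim_ definition above) =====
theorem find_hex_group_spec : Claim_equal_find_hex_group := by
  intro s t _ hpre
  exact main s t hpre
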